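-- pv_equiv track=rewrite | github.com/peteratt/sdc-p2 | trafficsigns_input.py | _get_n_img_per_class
-- ===== SOURCE A (Python) =====
-- def _get_n_img_per_class(labels):
--     n_img_per_class = []
--     current_y = 0
--     current_count = 0
--
--     for y in labels:
--         if y == current_y:
--             current_count += 1
--         else:
--             current_y = y
--             n_img_per_class.append(current_count)
--             current_count = 1
--
--     n_img_per_class.append(current_count)
--     return n_img_per_class
-- ===== SOURCE B (Python) =====
-- def _get_n_img_per_class(labels):
--     # Record the indices where the class id changes, then the run sizes are
--     # the successive differences of the edge list [0, *change_indices, len].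
--     prev = 0
--     change_at = []
--     for i, y in enumerate(labels):
--         if y != prev:
--             change_at.append(i)
--         prev = y
--     edges = [0] + change_at + [len(labels)]
--     return [b - a for a, b in zip(edges, edges[1:])]
-- ===== Notes on version B (the rewrite author's own statement) =====
-- stated objective: alternative
-- what changed: Replaces A's incremental count-carrying state machine with a two-pass decomposition: first collect the indices where the class id changes, then return the successive differences of the edge list [0, *change_indices, len(labels)].
import Mathlib
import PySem

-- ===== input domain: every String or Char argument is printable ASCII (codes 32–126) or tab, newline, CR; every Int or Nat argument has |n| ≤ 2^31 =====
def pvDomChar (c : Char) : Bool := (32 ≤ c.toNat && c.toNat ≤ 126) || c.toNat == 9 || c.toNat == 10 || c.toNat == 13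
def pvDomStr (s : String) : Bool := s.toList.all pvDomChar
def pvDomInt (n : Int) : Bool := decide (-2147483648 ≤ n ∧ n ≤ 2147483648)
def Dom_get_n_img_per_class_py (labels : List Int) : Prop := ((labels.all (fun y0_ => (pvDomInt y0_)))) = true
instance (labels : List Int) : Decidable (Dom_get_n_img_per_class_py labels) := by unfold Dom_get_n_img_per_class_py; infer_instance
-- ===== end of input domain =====

-- B is an alternative decomposition: collect the change indices, then take successive
-- differences of the edge list, instead of A's count-carrying state machine.

-- ===== PORT A =====
-- literal transliteration of A's loop: state (n_img_per_class, current_y, current_count)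
def get_n_img_per_class_py (labels : List Int) : List Int :=
  let s := labels.foldl
    (fun (st : List Int × Int × Int) y =>
      if y = st.2.1 then (st.1, st.2.1, st.2.2 + 1)
      else (st.1 ++ [st.2.2], y, 1))
    ([], 0, 0)
  s.1 ++ [s.2.2]

-- ===== PORT B =====
-- loop 'for i, y in enumerate(labels)': state (change_at, prev)
def get_n_img_per_class_py_alt (labels : List Int) : List Int :=
  let st := (PySem.List.enumerate labels 0).foldl
    (fun (st : List Int × Int) (p : Int × Int) =>
      (if p.2 ≠ st.2 then st.1 ++ [p.1] else st.1, p.2))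
    ([], 0)
  let edges := 0 :: st.1 ++ [(labels.length : Int)]
  (edges.zip edges.tail).map (fun p => p.2 - p.1)

-- ===== PRECONDITION & SPEC =====
def Spec_get_n_img_per_class_py (labels : List Int) (out : List Int) : Prop := out = get_n_img_per_class_py_alt labels
instance (labels : List Int) (out : List Int) : Decidable (Spec_get_n_img_per_class_py labels out) := by unfold Spec_get_n_img_per_class_py; infer_instance

-- ===== CLAIM =====
def Claim_equal_get_n_img_per_class_py : Prop := ∀ (labels : List Int), Dom_get_n_img_per_class_py labels → Spec_get_n_img_per_class_py labels (get_n_img_per_class_py labels)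

-- ===== LEMMAS AND PROOFS =====

-- reference run-length state machine: A's loop without the accumulator
def pvRL (y c : Int) (xs : List Int) : List Int :=
  match xs with
  | [] => [c]
  | x :: t => if x = y then pvRL y (c + 1) t else c :: pvRL x 1 t

theorem foldA_eq (xs : List Int) (acc : List Int) (y c : Int) :
    (let s := xs.foldl
      (fun (st : List Int × Int × Int) z =>
        if z = st.2.1 then (st.1, st.2.1, st.2.2 + 1)
        else (st.1 ++ [st.2.2], z, 1)) (acc, y, c)
     s.1 ++ [s.2.2]) = acc ++ pvRL y c xs := by
  induction xs generalizing acc y c with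
  | nil => simp [pvRL]
  | cons x t ih =>
    simp only [List.foldl_cons, pvRL]
    split
    · exact ih acc y (c + 1)
    · rw [ih (acc ++ [c]) x 1]; simp

-- the change indices B's first pass collects
def pvBnds (prev i : Int) (xs : List Int) : List Int :=
  match xs with
  | [] => []
  | x :: t => if x ≠ prev then i :: pvBnds x (i + 1) t else pvBnds x (i + 1) t

theorem foldB_eq (xs : List Int) (acc : List Int) (prev s : Int) :
    ((PySem.List.enumerate xs s).foldl
      (fun (st : List Int × Int) (p : Int × Int) =>
        (if p.2 ≠ st.2 then st.1 ++ [p.1] else st.1, p.2))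
      (acc, prev)).1 = acc ++ pvBnds prev s xs := by
  induction xs generalizing acc prev s with
  | nil => simp [PySem.List.enumerate_nil, pvBnds]
  | cons x t ih =>
    rw [PySem.List.enumerate_cons]
    simp only [List.foldl_cons, pvBnds]
    split
    · rw [ih (acc ++ [s]) x (s + 1)]; simp
    · exact ih acc x (s + 1)

-- successive differences of the edge list a :: bs ++ [last]
def pvDiffs (a : Int) (bs : List Int) (last : Int) : List Int :=
  match bs with
  | [] => [last - a]
  | b :: t => (b - a) :: pvDiffs b t last

theorem zip_diffs (bs : List Int) (a last : Int) :
    (((a :: (bs ++ [last])).zip (bs ++ [last])).map (fun p => p.2 - p.1))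
      = pvDiffs a bs last := by
  induction bs generalizing a with
  | nil => simp [pvDiffs]
  | cons b t ih => simp only [List.cons_append, List.zip_cons_cons, List.map_cons, pvDiffs]
                   rw [← ih b]

theorem pvRL_diffs (xs : List Int) (prev c i : Int) :
    pvRL prev c xs = pvDiffs (i - c) (pvBnds prev i xs) (i + xs.length) := by
  induction xs generalizing prev c i with
  | nil => simp [pvRL, pvBnds, pvDiffs]
  | cons x t ih =>
    simp only [pvRL, pvBnds, List.length_cons]
    have hc : (i + 1 : Int) + (t.length : Int) = i + ((t.length : Int) + 1) := by ring
    by_cases h : x = prev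
    · subst h
      rw [if_pos rfl, if_neg (by simp)]
      have := ih x (c + 1) (i + 1)
      rw [this]
      have h1 : (i + 1 : Int) - (c + 1) = i - c := by ring
      rw [h1]
      push_cast
      rw [hc]
    · rw [if_neg h, if_pos h]
      simp only [pvDiffs]
      have := ih x 1 (i + 1)
      rw [this]
      have h1 : (i : Int) - (i - c) = c := by ring
      have h2 : (i + 1 : Int) - 1 = i := by ring
      rw [h1, h2]
      push_cast
      rw [hc]

-- ===== VERDICT =====
theorem get_n_img_per_class_py_spec : Claim_equal_get_n_img_per_class_py := by
  intro labels _
  show get_n_img_per_class_py labels = get_n_img_per_class_py_alt labels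
  have hA : get_n_img_per_class_py labels = pvRL 0 0 labels := by
    have := foldA_eq labels [] 0 0
    simpa [get_n_img_per_class_py] using this
  rw [hA]
  simp only [get_n_img_per_class_py_alt]
  rw [foldB_eq labels [] 0 0]
  simp only [List.nil_append, List.cons_append, List.tail_cons]
  rw [zip_diffs]
  have := pvRL_diffs labels 0 0 0
  simpa using this
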